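-- pv_equiv track=rewrite | github.com/jjjjamess/pssai2 | constraints.py | length_work_blocks_constraint
-- ===== SOURCE A (Python) =====
-- def length_work_blocks_constraint(result, input_data):
--     for e in range(input_data['number_of_employees']):
--         count_consecutive = 0
--         min_flag, max_flag = False, False
--         for d in range(input_data['length_of_schedule'] - 1):
--             if result[e][d] != '-' and result[e][d+1] != '-':
--                 count_consecutive += 1
--                 if count_consecutive >= input_data['min_length_work_blocks'] - 1:
--                     min_flag = True
--                     if count_consecutive <= input_data['max_length_work_blocks'] - 1:
--                         max_flag = True
--             else:  count_consecutive = 0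
--         if min_flag and max_flag: pass
--         else: return False
--     return True
-- ===== SOURCE B (Python) =====
-- def length_work_blocks_constraint(result, input_data):
--     n = input_data['number_of_employees']
--     if n <= 0:
--         return True  # no employees, nothing to check
--     length = input_data['length_of_schedule']
--     lo = max(1, input_data['min_length_work_blocks'] - 1)
--     hi = input_data['max_length_work_blocks'] - 1
--     for e in range(n):
--         # collect lengths of maximal work runs (consecutive non-'-' cells)
--         runs = []
--         cur = 0
--         for d in range(length):
--             if result[e][d] != '-':
--                 cur += 1
--             else:
--                 runs.append(cur)
--                 cur = 0
--         runs.append(cur)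
--         if not any(lo <= min(r - 1, hi) for r in runs):
--             return False
--     return True
-- ===== Notes on version B (the rewrite author's own statement) =====
-- stated objective: alternative
-- what changed: Replaces A's inline counter-plus-two-flags state machine over adjacent day pairs by a runs-then-predicate decomposition: one pass collects each employee's maximal work-run lengths, then an interval-overlap test max(1,min-1) <= min(run-1,max-1) decides the employee.
import Mathlib
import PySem

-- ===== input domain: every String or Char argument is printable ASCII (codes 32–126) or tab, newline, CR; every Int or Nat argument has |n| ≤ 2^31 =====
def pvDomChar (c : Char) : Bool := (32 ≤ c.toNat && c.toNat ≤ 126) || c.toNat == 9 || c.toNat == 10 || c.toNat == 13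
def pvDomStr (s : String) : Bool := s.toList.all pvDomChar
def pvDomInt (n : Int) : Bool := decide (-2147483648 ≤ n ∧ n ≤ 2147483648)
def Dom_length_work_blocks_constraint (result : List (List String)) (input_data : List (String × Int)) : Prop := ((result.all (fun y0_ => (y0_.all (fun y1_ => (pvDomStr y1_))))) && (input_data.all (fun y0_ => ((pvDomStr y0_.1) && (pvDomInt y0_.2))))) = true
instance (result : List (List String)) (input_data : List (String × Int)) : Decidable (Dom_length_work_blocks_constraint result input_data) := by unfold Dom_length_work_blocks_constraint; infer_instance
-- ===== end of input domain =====

-- B replaces A's counter-plus-two-flags state machine by a runs-then-interval-overlap decomposition (same cost; equivalence proved on Pre_).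


-- ===== PORT A =====
-- inner loop body: `if result[e][d] != '-' and result[e][d+1] != '-': …` (indexing is
-- pyGetD; the default is never reached under Pre_, which puts every read index in range)
def pvAstep (row : List String) (mn mx : Int) (st : Int × Bool × Bool) (d : Int) : Int × Bool × Bool :=
  if PySem.List.pyGetD row d "-" ≠ "-" ∧ PySem.List.pyGetD row (d + 1) "-" ≠ "-" then
    let c := st.1 + 1
    if mn - 1 ≤ c then
      if c ≤ mx - 1 then (c, true, true) else (c, true, st.2.2)
    else (c, st.2.1, st.2.2)
  else (0, st.2.1, st.2.2)

-- one employee: `for d in range(length_of_schedule - 1): …` then `min_flag and max_flag`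
-- (A re-reads the unmodified dict inside the loop; the values are passed in once as mn/mx)
def pvApassRow (row : List String) (mn mx L : Int) : Bool :=
  let st := (PySem.List.pyRange 0 (L - 1) 1).foldl (pvAstep row mn mx) (0, false, false)
  st.2.1 && st.2.2

-- `for e in range(number_of_employees): … else: return False` / final `return True`
def pvAloop (result : List (List String)) (mn mx L : Int) : List Int → Bool
  | [] => true
  | e :: es =>
      if pvApassRow (PySem.List.pyGetD result e []) mn mx L then pvAloop result mn mx L es
      else false

def length_work_blocks_constraint (result : List (List String)) (input_data : List (String × Int)) : Bool :=
  let dd := PySem.Dict.mk input_data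
  pvAloop result (dd.getD "min_length_work_blocks" 0) (dd.getD "max_length_work_blocks" 0)
    (dd.getD "length_of_schedule" 0)
    (PySem.List.pyRange 0 (dd.getD "number_of_employees" 0) 1)

-- ===== PORT B =====
-- run collection: `if result[e][d] != '-': cur += 1 else: runs.append(cur); cur = 0`
def pvBstep (row : List String) (st : List Int × Int) (d : Int) : List Int × Int :=
  if PySem.List.pyGetD row d "-" ≠ "-" then (st.1, st.2 + 1) else (st.1 ++ [st.2], 0)

def pvBruns (row : List String) (L : Int) : List Int :=
  let st := (PySem.List.pyRange 0 L 1).foldl (pvBstep row) ([], 0)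
  st.1 ++ [st.2]

-- `any(lo <= min(r - 1, hi) for r in runs)`
def pvBok (lo hi : Int) (runs : List Int) : Bool := runs.any (fun r => decide (lo ≤ min (r - 1) hi))

def pvBloop (result : List (List String)) (lo hi L : Int) : List Int → Bool
  | [] => true
  | e :: es =>
      if pvBok lo hi (pvBruns (PySem.List.pyGetD result e []) L) then pvBloop result lo hi L es
      else false

def length_work_blocks_constraint_alt (result : List (List String)) (input_data : List (String × Int)) : Bool :=
  let dd := PySem.Dict.mk input_data
  let n := dd.getD "number_of_employees" 0
  if n ≤ 0 then true  -- `if n <= 0: return True`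
  else
    pvBloop result (max 1 (dd.getD "min_length_work_blocks" 0 - 1)) (dd.getD "max_length_work_blocks" 0 - 1)
      (dd.getD "length_of_schedule" 0)
      (PySem.List.pyRange 0 n 1)

-- ===== PRECONDITION & SPEC =====
-- Pre_ excludes the inputs where A raises (missing dict key, or a scanned row missing/too
-- short). It is a sufficient closed-form bound, slightly narrower than A's exact domain:
-- A can return False early without reading the min/max keys or later rows, so a few
-- early-False inputs with missing keys/short later rows are also excluded (see cites).
def Pre_length_work_blocks_constraint (result : List (List String)) (input_data : List (String × Int)) : Prop :=
  ((PySem.Dict.mk input_data).get? "number_of_employees").isSome ∧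
  (0 < (PySem.Dict.mk input_data).getD "number_of_employees" 0 →
    ((PySem.Dict.mk input_data).get? "length_of_schedule").isSome ∧
    ((PySem.Dict.mk input_data).get? "min_length_work_blocks").isSome ∧
    ((PySem.Dict.mk input_data).get? "max_length_work_blocks").isSome ∧
    (PySem.Dict.mk input_data).getD "number_of_employees" 0 ≤ (result.length : Int) ∧
    ∀ row ∈ result.take ((PySem.Dict.mk input_data).getD "number_of_employees" 0).toNat,
      (PySem.Dict.mk input_data).getD "length_of_schedule" 0 ≤ (row.length : Int))
instance (result : List (List String)) (input_data : List (String × Int)) : Decidable (Pre_length_work_blocks_constraint result input_data) := by unfold Pre_length_work_blocks_constraint; infer_instance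

def pvWitness_length_work_blocks_constraint : List (List String) × (List (String × Int)) :=
  ([["x", "x"]],
   [("number_of_employees", 1), ("length_of_schedule", 2),
    ("min_length_work_blocks", 2), ("max_length_work_blocks", 2)])

def Spec_length_work_blocks_constraint (result : List (List String)) (input_data : List (String × Int)) (out : Bool) : Prop := out = length_work_blocks_constraint_alt result input_data
instance (result : List (List String)) (input_data : List (String × Int)) (out : Bool) : Decidable (Spec_length_work_blocks_constraint result input_data out) := by unfold Spec_length_work_blocks_constraint; infer_instance

-- ===== CLAIM (what is proved, stated in full; the proofs are below) =====
def Claim_equal_length_work_blocks_constraint : Prop := ∀ (result : List (List String)) (input_data : List (String × Int)), Dom_length_work_blocks_constraint result input_data → Pre_length_work_blocks_constraint result input_data → Spec_length_work_blocks_constraint result input_data (length_work_blocks_constraint result input_data)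

-- ===== LEMMAS AND PROOFS =====

-- the per-run predicates A's two flags amount to
def pvPm (mn : Int) (r : Int) : Bool := decide (2 ≤ r ∧ mn - 1 ≤ r - 1)
def pvPx (mn mx : Int) (r : Int) : Bool := decide (max 1 (mn - 1) ≤ min (r - 1) (mx - 1))

-- A's inner-loop state after pairs 0..n-2 / B's after cells 0..n-1
def pvSA (row : List String) (mn mx : Int) (n : Int) : Int × Bool × Bool :=
  (PySem.List.pyRange 0 (n - 1) 1).foldl (pvAstep row mn mx) (0, false, false)
def pvSB (row : List String) (n : Int) : List Int × Int :=
  (PySem.List.pyRange 0 n 1).foldl (pvBstep row) ([], 0)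

theorem pvSB_succ (row : List String) (n : Nat) :
    pvSB row ((n : Int) + 1) = pvBstep row (pvSB row (n : Int)) (n : Int) := by
  unfold pvSB
  rw [PySem.List.pyRange_one_succ_right (by omega)]
  simp [List.foldl_append]

theorem pvSA_succ (row : List String) (mn mx : Int) (k : Int) (hk : 1 ≤ k) :
    pvSA row mn mx (k + 1) = pvAstep row mn mx (pvSA row mn mx k) (k - 1) := by
  unfold pvSA
  rw [show k + 1 - 1 = (k - 1) + 1 by ring, PySem.List.pyRange_one_succ_right (by omega)]
  simp [List.foldl_append]

-- loop invariant tying A's (count, min_flag, max_flag) to B's (runs, cur)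
def pvInv (row : List String) (mn mx : Int) (n : Nat) : Prop :=
  (pvSA row mn mx (n : Int)).1 = max ((pvSB row (n : Int)).2 - 1) 0 ∧
  0 ≤ (pvSB row (n : Int)).2 ∧
  (0 < (pvSB row (n : Int)).2 ↔ (0 < n ∧ PySem.List.pyGetD row ((n : Int) - 1) "-" ≠ "-")) ∧
  (pvSA row mn mx (n : Int)).2.1 = ((pvSB row (n : Int)).1 ++ [(pvSB row (n : Int)).2]).any (pvPm mn) ∧
  (pvSA row mn mx (n : Int)).2.2 = ((pvSB row (n : Int)).1 ++ [(pvSB row (n : Int)).2]).any (pvPx mn mx)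

theorem pv_inv (row : List String) (mn mx : Int) : ∀ n : Nat, pvInv row mn mx n := by
  intro n
  induction n with
  | zero =>
      have hA : pvSA row mn mx 0 = (0, false, false) := by
        unfold pvSA; rw [PySem.List.pyRange_one_eq_nil (by omega)]; rfl
      have hB : pvSB row 0 = ([], 0) := by
        unfold pvSB; rw [PySem.List.pyRange_one_eq_nil (by omega)]; rfl
      refine ⟨?_, ?_, ?_, ?_, ?_⟩ <;>
        simp [hA, hB, pvPm, pvPx]
  | succ n ih =>
      have hc : ((n + 1 : Nat) : Int) = (n : Int) + 1 := by push_cast; ring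
      cases n with
      | zero =>
          have hA : pvSA row mn mx 1 = (0, false, false) := by
            unfold pvSA; rw [show (1 : Int) - 1 = 0 by ring, PySem.List.pyRange_one_eq_nil (by omega)]; rfl
          have hB1 : pvSB row 1 = pvBstep row ([], 0) 0 := by
            unfold pvSB
            rw [PySem.List.pyRange_one_cons (by omega), PySem.List.pyRange_one_eq_nil (by omega)]
            rfl
          unfold pvInv
          push_cast
          rw [hA, hB1]
          unfold pvBstep
          by_cases h0 : PySem.List.pyGetD row 0 "-" = "-"
          · refine ⟨?_, ?_, ?_, ?_, ?_⟩ <;>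
              simp [h0, pvPm, pvPx]
          · refine ⟨?_, ?_, ?_, ?_, ?_⟩ <;>
              simp [h0, pvPm, pvPx]
      | succ m =>
          unfold pvInv at ih ⊢
          push_cast at ih ⊢
          have hSA := pvSA_succ row mn mx ((m : Int) + 1) (by omega)
          have hSB := pvSB_succ row (m + 1)
          push_cast at hSB
          rcases hA : pvSA row mn mx ((m : Int) + 1) with ⟨cnt, minf, maxf⟩
          rcases hB : pvSB row ((m : Int) + 1) with ⟨rs, c⟩
          simp only [hA, hB] at ih hSA hSB
          obtain ⟨h1, h2, h3, h4, h5⟩ := ih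
          subst h1
          rw [hSA, hSB, show (m : Int) + 1 + 1 - 1 = (m : Int) + 1 from by ring]
          have hidx : ((m : Int) + 1 - 1) + 1 = (m : Int) + 1 := by ring
          by_cases ha : PySem.List.pyGetD row ((m : Int) + 1 - 1) "-" = "-"
          · have hc0 : c = 0 := by
              by_contra hne
              exact (h3.mp (by omega)).2 ha
            have eA : pvAstep row mn mx (max (c - 1) 0, minf, maxf) ((m : Int) + 1 - 1)
                = (0, minf, maxf) := by
              unfold pvAstep
              rw [if_neg (fun h => h.1 ha)]
            by_cases hb : PySem.List.pyGetD row ((m : Int) + 1) "-" = "-"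
            · have eB : pvBstep row (rs, c) ((m : Int) + 1) = (rs ++ [c], 0) := by
                simp [pvBstep, hb]
              rw [eA, eB]
              refine ⟨by omega, by omega,
                by exact ⟨fun h => absurd h (by omega), fun h => absurd hb h.2⟩, ?_, ?_⟩
              · rw [h4]; simp [List.any_append, hc0, pvPm]
              · rw [h5]; simp [List.any_append, hc0, pvPx]
            · have eB : pvBstep row (rs, c) ((m : Int) + 1) = (rs, c + 1) := by
                simp [pvBstep, hb]
              rw [eA, eB]
              refine ⟨by omega, by omega,
                by exact ⟨fun _ => ⟨by omega, hb⟩, fun _ => by omega⟩, ?_, ?_⟩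
              · rw [h4]; simp [List.any_append, hc0, pvPm]
              · rw [h5]; simp [List.any_append, hc0, pvPx]
          · have hcpos : 0 < c := h3.mpr ⟨by omega, ha⟩
            have hmax : max (c - 1) 0 = c - 1 := by omega
            by_cases hb : PySem.List.pyGetD row ((m : Int) + 1) "-" = "-"
            · have eA : pvAstep row mn mx (max (c - 1) 0, minf, maxf) ((m : Int) + 1 - 1)
                  = (0, minf, maxf) := by
                simp [pvAstep, hb]
              have eB : pvBstep row (rs, c) ((m : Int) + 1) = (rs ++ [c], 0) := by
                simp [pvBstep, hb]
              rw [eA, eB]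
              refine ⟨by omega, by omega,
                by exact ⟨fun h => absurd h (by omega), fun h => absurd hb h.2⟩, ?_, ?_⟩
              · rw [h4]; simp [List.any_append, pvPm]
              · rw [h5]; simp [List.any_append, pvPx]
            · have eA : pvAstep row mn mx (max (c - 1) 0, minf, maxf) ((m : Int) + 1 - 1)
                  = if mn - 1 ≤ c then
                      if c ≤ mx - 1 then (c, true, true) else (c, true, maxf)
                    else (c, minf, maxf) := by
                unfold pvAstep
                rw [hidx, if_pos ⟨ha, hb⟩, hmax, show c - 1 + 1 = c by ring]
              have eB : pvBstep row (rs, c) ((m : Int) + 1) = (rs, c + 1) := by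
                simp [pvBstep, hb]
              rw [eA, eB]
              refine ⟨?_, by omega,
                by exact ⟨fun _ => ⟨by omega, hb⟩, fun _ => by omega⟩, ?_, ?_⟩
              · split_ifs <;> simp <;> omega
              · by_cases hm : mn - 1 ≤ c
                · rw [if_pos hm]
                  have : pvPm mn (c + 1) = true := by simp [pvPm]; omega
                  split_ifs <;> simp [List.any_append, this]
                · rw [if_neg hm, h4]
                  have e1 : pvPm mn (c + 1) = false := by simp [pvPm]; omega
                  have e2 : pvPm mn c = false := by simp [pvPm]; omega
                  simp [List.any_append, e1, e2]
              · by_cases hm : mn - 1 ≤ c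
                · rw [if_pos hm]
                  by_cases hx : c ≤ mx - 1
                  · rw [if_pos hx]
                    have : pvPx mn mx (c + 1) = true := by simp [pvPx]; omega
                    simp [List.any_append, this]
                  · rw [if_neg hx]
                    rw [h5]
                    have : pvPx mn mx (c + 1) = pvPx mn mx c := by
                      simp only [pvPx]
                      by_cases hp : max 1 (mn - 1) ≤ min (c - 1) (mx - 1) <;>
                        [ (rw [decide_eq_true hp, decide_eq_true (by omega : max 1 (mn - 1) ≤ min (c + 1 - 1) (mx - 1))]);
                          (rw [decide_eq_false hp, decide_eq_false (by omega : ¬ max 1 (mn - 1) ≤ min (c + 1 - 1) (mx - 1))]) ]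
                    simp [List.any_append, this]
                · rw [if_neg hm, h5]
                  have e1 : pvPx mn mx (c + 1) = false := by simp [pvPx]; omega
                  have e2 : pvPx mn mx c = false := by simp [pvPx]; omega
                  simp [List.any_append, e1, e2]

theorem pv_any_px_pm (mn mx : Int) (l : List Int) :
    (l.any (pvPm mn) && l.any (pvPx mn mx)) = l.any (pvPx mn mx) := by
  cases hx : l.any (pvPx mn mx)
  · simp
  · simp only [Bool.and_true]
    rcases List.any_eq_true.mp hx with ⟨r, hr, hpr⟩
    refine List.any_eq_true.mpr ⟨r, hr, ?_⟩
    simp [pvPm, pvPx] at hpr ⊢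
    omega

theorem pv_row_eq (row : List String) (mn mx L : Int) :
    pvApassRow row mn mx L = pvBok (max 1 (mn - 1)) (mx - 1) (pvBruns row L) := by
  show ((pvSA row mn mx L).2.1 && (pvSA row mn mx L).2.2)
      = ((pvSB row L).1 ++ [(pvSB row L).2]).any (pvPx mn mx)
  by_cases hL : L ≤ 0
  · have e1 : pvSA row mn mx L = (0, false, false) := by
      unfold pvSA; rw [PySem.List.pyRange_one_eq_nil (by omega)]; rfl
    have e2 : pvSB row L = ([], 0) := by
      unfold pvSB; rw [PySem.List.pyRange_one_eq_nil (by omega)]; rfl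
    rw [e1, e2]
    simp [pvPx]
  · obtain ⟨-, -, -, h4, h5⟩ := pv_inv row mn mx L.toNat
    rw [show ((L.toNat : Nat) : Int) = L from by omega] at h4 h5
    rw [h4, h5, pv_any_px_pm]

theorem pv_loop_eq (result : List (List String)) (mn mx L : Int) (es : List Int) :
    pvAloop result mn mx L es = pvBloop result (max 1 (mn - 1)) (mx - 1) L es := by
  induction es with
  | nil => rfl
  | cons e es ih =>
      simp only [pvAloop, pvBloop, pv_row_eq, ih]

-- ===== VERDICT (by name: the statement is the Claim_ definition above) =====
theorem length_work_blocks_constraint_spec : Claim_equal_length_work_blocks_constraint := by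
  intro result input_data _ _
  unfold Spec_length_work_blocks_constraint length_work_blocks_constraint length_work_blocks_constraint_alt
  dsimp only
  by_cases hn : (PySem.Dict.mk input_data).getD "number_of_employees" 0 ≤ 0
  · rw [if_pos hn, PySem.List.pyRange_one_eq_nil hn]
    rfl
  · rw [if_neg hn]
    exact pv_loop_eq _ _ _ _ _
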